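-- pv_equiv track=rewrite | github.com/lsbloo/Gerador-de-Horarios | algortimoGA/ativacoes.py | getter_search
-- ===== SOURCE A (Python) =====
-- def search(dispx,periodo,lenxc,limitador=0):
--         q = []
--         for i in range(len(dispx)):
--             if dispx[i][2] == lenxc[limitador]:
--                 if dispx[i][1] == periodo:
--                         q.append(dispx[i])
--         for i in q:
--             if i == None:
--                 q.remove(i)
--         return {"dt": q, "l": limitador}
--
-- def getter_search(dispx,lenxp,lenxc,limitador):
--         d = []
--         for i in range(len(lenxp)):
--             searchx = search(dispx,lenxp[i],lenxc,limitador)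
--             if searchx.get("dt") != None:
--                 d.append(searchx.get("dt"))
--         if len(d) != 0 or d != None:
--             pacote = []
--             for i in d:
--                 if i != None:
--                     pacote.append(i)
--             return pacote
-- ===== SOURCE B (Python) =====
-- def getter_search(dispx, lenxp, lenxc, limitador):
--     if not lenxp or not dispx:
--         return [[] for _ in lenxp]
--     code = lenxc[limitador]
--     by_period = {}
--     for row in dispx:
--         if row[2] == code:
--             by_period.setdefault(row[1], []).append(row)
--     return [by_period.get(p, []) for p in lenxp]
-- ===== Notes on version B (the rewrite author's own statement) =====
-- stated objective: alternative
-- what changed: B scans dispx once, grouping matching rows into a dict keyed by period, and answers each period in lenxp by one dict lookup, instead of A's full rescan of dispx (inside its helper search) for every period.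
import Mathlib
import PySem

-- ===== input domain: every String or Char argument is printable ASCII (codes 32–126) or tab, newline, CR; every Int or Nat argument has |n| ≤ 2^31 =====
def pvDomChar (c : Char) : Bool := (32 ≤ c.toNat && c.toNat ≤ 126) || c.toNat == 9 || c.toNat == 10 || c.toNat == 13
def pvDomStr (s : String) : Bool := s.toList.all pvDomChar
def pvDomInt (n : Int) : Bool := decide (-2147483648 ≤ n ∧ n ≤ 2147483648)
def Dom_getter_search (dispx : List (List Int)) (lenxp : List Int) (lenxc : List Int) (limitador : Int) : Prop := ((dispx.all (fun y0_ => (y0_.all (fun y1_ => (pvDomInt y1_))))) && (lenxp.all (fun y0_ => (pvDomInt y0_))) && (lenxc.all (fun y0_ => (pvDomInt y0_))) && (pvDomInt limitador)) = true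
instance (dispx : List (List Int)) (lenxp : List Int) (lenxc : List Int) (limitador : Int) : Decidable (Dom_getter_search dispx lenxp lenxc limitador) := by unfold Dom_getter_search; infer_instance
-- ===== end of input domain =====

-- B replaces A's rescan of dispx for every period by one grouping pass (dict period → rows) plus a lookup per period; same return value.


-- ===== PORT A =====
-- Python's search returns the dict {"dt": q, "l": limitador}; only the string keys "dt"/"l" occur,
-- so it is ported as the pair (q, limitador): .get("dt") = .1 (always a list, never None).
-- row = dispx[i]; row[2], lenxc[limitador], row[1]: Python raises IndexError out of range; those inputs are outside Pre_
def pvSearch (dispx : List (List Int)) (periodo : Int) (lenxc : List Int) (limitador : Int) : List (List Int) × Int :=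
  let q := (PySem.List.pyRange 0 (dispx.length : Int) 1).foldl (fun q i =>
    if PySem.List.pyGetD (PySem.List.pyGetD dispx i []) 2 0 = PySem.List.pyGetD lenxc limitador 0 then
      if PySem.List.pyGetD (PySem.List.pyGetD dispx i []) 1 0 = periodo then
        q ++ [PySem.List.pyGetD dispx i []]
      else q
    else q) []
  -- 'for i in q: if i == None: q.remove(i)': a no-op — elements of q are lists, never None
  (q, limitador)

def getter_search (dispx : List (List Int)) (lenxp : List Int) (lenxc : List Int) (limitador : Int) : List (List (List Int)) :=
  -- 'searchx.get("dt") != None': always true, "dt" maps to a list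
  let d := lenxp.foldl (fun d p => d ++ [(pvSearch dispx p lenxc limitador).1]) []
  -- 'if len(d) != 0 or d != None': always true (d is a list, never None)
  -- 'if i != None': always true (i is a list)
  d.foldl (fun pacote i => pacote ++ [i]) []

-- ===== PORT B =====
def getter_search_alt (dispx : List (List Int)) (lenxp : List Int) (lenxc : List Int) (limitador : Int) : List (List (List Int)) :=
  if lenxp.isEmpty || dispx.isEmpty then lenxp.map (fun _ => ([] : List (List Int)))
  else
    match PySem.List.pyGet? lenxc limitador with
    | none => []  -- Python B raises IndexError here; outside Pre_
    | some code =>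
      let byp : PySem.Dict Int (List (List Int)) := dispx.foldl (fun d row =>
        if PySem.List.pyGetD row 2 0 = code then
          d.insert (PySem.List.pyGetD row 1 0) (d.getD (PySem.List.pyGetD row 1 0) [] ++ [row])
        else d) PySem.Dict.empty
      lenxp.map (fun p => byp.getD p [])

-- ===== PRECONDITION & SPEC =====
-- Pre_ excludes exactly the inputs where Python A raises IndexError: with periods and rows present,
-- every row needs indices 1 and 2 and lenxc needs index limitador.
def Pre_getter_search (dispx : List (List Int)) (lenxp : List Int) (lenxc : List Int) (limitador : Int) : Prop :=
  lenxp = [] ∨ dispx = [] ∨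
    (PySem.Raise.InRange lenxc.length limitador ∧ ∀ r ∈ dispx, 3 ≤ r.length)
instance (dispx : List (List Int)) (lenxp : List Int) (lenxc : List Int) (limitador : Int) : Decidable (Pre_getter_search dispx lenxp lenxc limitador) := by unfold Pre_getter_search; infer_instance

def pvWitness_getter_search : List (List Int) × List Int × List Int × Int := ([[1, 2, 3], [4, 5, 3]], [2, 5], [3], 0)

def Spec_getter_search (dispx : List (List Int)) (lenxp : List Int) (lenxc : List Int) (limitador : Int) (out : List (List (List Int))) : Prop := out = getter_search_alt dispx lenxp lenxc limitador
instance (dispx : List (List Int)) (lenxp : List Int) (lenxc : List Int) (limitador : Int) (out : List (List (List Int))) : Decidable (Spec_getter_search dispx lenxp lenxc limitador out) := by unfold Spec_getter_search; infer_instance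

-- ===== CLAIM (what is proved, stated in full; the proofs are below) =====
def Claim_equal_getter_search : Prop := ∀ (dispx : List (List Int)) (lenxp : List Int) (lenxc : List Int) (limitador : Int), Dom_getter_search dispx lenxp lenxc limitador → Pre_getter_search dispx lenxp lenxc limitador → Spec_getter_search dispx lenxp lenxc limitador (getter_search dispx lenxp lenxc limitador)

-- ===== LEMMAS AND PROOFS =====

-- A's append loop and B's dict-grouping loop agree period by period.
theorem pv_loop_eq (code p : Int) :
    ∀ (xs : List (List Int)) (d : PySem.Dict Int (List (List Int))) (q : List (List Int)),
      d.getD p [] = q →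
      xs.foldl (fun q row =>
          if PySem.List.pyGetD row 2 0 = code then
            (if PySem.List.pyGetD row 1 0 = p then q ++ [row] else q)
          else q) q
        = (xs.foldl (fun d row =>
            if PySem.List.pyGetD row 2 0 = code then
              d.insert (PySem.List.pyGetD row 1 0) (d.getD (PySem.List.pyGetD row 1 0) [] ++ [row])
            else d) d).getD p [] := by
  intro xs
  induction xs with
  | nil => intro d q h; simpa using h.symm
  | cons row rest ih =>
    intro d q h
    simp only [List.foldl_cons]
    by_cases h2 : PySem.List.pyGetD row 2 0 = code
    · simp only [if_pos h2]
      by_cases h1 : PySem.List.pyGetD row 1 0 = p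
      · refine ih _ _ ?_
        rw [PySem.Dict.getD_insert]
        simp [h1, h]
      · refine ih _ _ ?_
        rw [PySem.Dict.getD_insert, if_neg (fun hpe => h1 hpe.symm), if_neg h1]
        exact h
    · simp only [if_neg h2]; exact ih d q h

theorem getter_search_spec' (dispx : List (List Int)) (lenxp : List Int) (lenxc : List Int)
    (limitador : Int) (hpre : Pre_getter_search dispx lenxp lenxc limitador) :
    getter_search dispx lenxp lenxc limitador = getter_search_alt dispx lenxp lenxc limitador := by
  rcases hpre with hp | hd | ⟨hin, _hrows⟩
  · subst hp
    simp [getter_search, getter_search_alt]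
  · subst hd
    simp [getter_search, getter_search_alt, pvSearch, PySem.List.pyRange_one_eq_nil]
  · -- main case: lenxc[limitador] is in range
    obtain ⟨code, hc⟩ : ∃ c, PySem.List.pyGet? lenxc limitador = some c := by
      rcases h : PySem.List.pyGet? lenxc limitador with _ | c
      · exact absurd ((PySem.List.pyGet?_eq_none_iff lenxc limitador).mp h) (by simpa using hin)
      · exact ⟨c, rfl⟩
    have hgd : PySem.List.pyGetD lenxc limitador 0 = code := by
      simp [PySem.List.pyGetD, hc]
    by_cases hde : dispx = []
    · subst hde
      simp [getter_search, getter_search_alt, pvSearch, PySem.List.pyRange_one_eq_nil]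
    · have hsearch : ∀ p : Int, (pvSearch dispx p lenxc limitador).1
          = (dispx.foldl (fun d row =>
              if PySem.List.pyGetD row 2 0 = code then
                d.insert (PySem.List.pyGetD row 1 0) (d.getD (PySem.List.pyGetD row 1 0) [] ++ [row])
              else d) PySem.Dict.empty).getD p [] := by
        intro p
        unfold pvSearch
        rw [PySem.List.foldl_pyRange_zero_pyGetD' dispx ([] : List Int)
          (fun q row =>
            if PySem.List.pyGetD row 2 0 = PySem.List.pyGetD lenxc limitador 0 then
              (if PySem.List.pyGetD row 1 0 = p then q ++ [row] else q)
            else q) []]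
        rw [hgd]
        exact pv_loop_eq code p dispx PySem.Dict.empty [] rfl
      have hA : getter_search dispx lenxp lenxc limitador
          = lenxp.map (fun p => (pvSearch dispx p lenxc limitador).1) := by
        unfold getter_search
        rw [PySem.List.foldl_append_singleton_eq_self,
          PySem.List.foldl_append_singleton_eq_map, List.nil_append, List.nil_append]
      rw [hA]
      unfold getter_search_alt
      by_cases hl : lenxp = []
      · subst hl; simp
      · have hd' : dispx.isEmpty = false := by simp [hde]
        have hl' : lenxp.isEmpty = false := by simp [hl]
        rw [hl', hd']
        simp only [Bool.or_self, hc]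
        exact List.map_congr_left (fun p _ => hsearch p)


-- ===== VERDICT (by name: the statement is the Claim_ definition above) =====
theorem getter_search_spec : Claim_equal_getter_search := by
  intro dispx lenxp lenxc limitador _hdom hpre
  exact getter_search_spec' dispx lenxp lenxc limitador hpre
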